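-- pv_equiv track=rewrite | github.com/limdongjin/ProblemSolving | Boj/3085.py | solve
-- ===== SOURCE A (Python) =====
-- def solve(board):
--     n = len(board)
--     ans = -1
--     for y in range(n):
--         for x in range(n):
--             # 오른쪽과 swap
--             if x < n-1:
--                 swap(board, (y, x), (y, x+1))
--                 ans = max(ans, check(board, (y, x), (y, x+1)))
--                 swap(board, (y, x), (y, x+1))
--             # 아래와 swap
--             if y < n - 1:
--                 swap(board, (y, x), (y+1, x))
--                 ans = max(ans, check(board, (y, x), (y+1, x)))
--                 swap(board, (y, x), (y+1, x))
--     return ans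
--
-- def check(board, start, end):
--     start_row, start_col = start
--     end_row, end_col = end
--     n = len(board)
--     ans = -1
--
--     # 행 검사
--     for row in range(start_row, end_row+1):
--         cnt = 1
--         for x in range(0, n-1):
--             if board[row][x] == board[row][x+1]:
--                 cnt += 1
--             else:
--                 cnt = 1
--             ans = max(ans, cnt)
--
--     # 열 검사
--     for col in range(start_col, end_col+1):
--         cnt = 1
--         for y in range(0, n-1):
--             if board[y][col] == board[y+1][col]:
--                 cnt += 1
--             else:
--                 cnt = 1
--             ans = max(ans, cnt)
--
--     return ans
--
-- def swap(board, pos1, pos2):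
--     y, x = pos1
--     y1, x1 = pos2
--     board[y][x], board[y1][x1] = board[y1][x1], board[y][x]
-- ===== SOURCE B (Python) =====
-- def solve(board):
--     # O(n^2) instead of O(n^3): for every row and column precompute run-length
--     # arrays (pref, suf and their running maxima) ONCE; each adjacent swap is
--     # then evaluated in O(1) by closed formulas instead of rescanning lines.
--     n = len(board)
--     if n < 2:
--         return -1
--
--     def arrays(line):
--         # pref[i] = length of the equal-run ending at i; built left to right
--         pref = [1]
--         c = 1
--         for u, w in zip(line, line[1:]):
--             c = c + 1 if u == w else 1
--             pref.append(c)
--         # suf[i] = run starting at i: pref of the reversed line, reversed back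
--         rev = line[::-1]
--         rp = [1]
--         c = 1
--         for u, w in zip(rev, rev[1:]):
--             c = c + 1 if u == w else 1
--             rp.append(c)
--         suf = rp[::-1]
--         # premax[k] = max(pref[:k], default 0); sufmax[k] = max(suf[k:], default 0)
--         premax = [0]
--         c = 0
--         for p in pref:
--             c = max(c, p)
--             premax.append(c)
--         sm = [0]
--         c = 0
--         for s in rp:
--             c = max(c, s)
--             sm.append(c)
--         sufmax = sm[::-1]
--         return line, pref, suf, premax, sufmax
--
--     def replace(ar, x, v):
--         # longest run of the line after setting line[x] = v
--         line, pref, suf, premax, sufmax = ar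
--         left = pref[x - 1] if x > 0 and line[x - 1] == v else 0
--         right = suf[x + 1] if x + 1 < n and line[x + 1] == v else 0
--         return max(premax[x], sufmax[x + 1], left + 1 + right)
--
--     def pairswap(ar, x):
--         # longest run of the line after swapping line[x] and line[x+1]
--         line, pref, suf, premax, sufmax = ar
--         a, b = line[x], line[x + 1]
--         if a == b:
--             return premax[n]
--         left = (pref[x - 1] if x > 0 and line[x - 1] == b else 0) + 1
--         right = 1 + (suf[x + 2] if x + 2 < n and line[x + 2] == a else 0)
--         return max(premax[x], sufmax[x + 2], left, right)
--
--     rows = [arrays(r[:n]) for r in board]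
--     cols = [arrays([r[x] for r in board]) for x in range(n)]
--
--     best = -1
--     for y in range(n):
--         for x in range(n - 1):        # horizontal swap (y,x)-(y,x+1)
--             a, b = board[y][x], board[y][x + 1]
--             best = max(best, pairswap(rows[y], x),
--                        replace(cols[x], y, b), replace(cols[x + 1], y, a))
--     for y in range(n - 1):
--         for x in range(n):            # vertical swap (y,x)-(y+1,x)
--             a, b = board[y][x], board[y + 1][x]
--             best = max(best, replace(rows[y], x, b),
--                        replace(rows[y + 1], x, a), pairswap(cols[x], y))
--     return best
-- ===== Notes on version B (the rewrite author's own statement) =====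
-- stated objective: faster
-- what changed: B replaces A's rescan of every affected line after every swap (O(n) per swap) with run-length arrays (pref/suf and their running maxima) precomputed once per row and column, so each adjacent swap is evaluated in O(1) by closed formulas; the swap enumeration is split into a horizontal and a vertical loop and the board is never mutated.
import Mathlib
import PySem

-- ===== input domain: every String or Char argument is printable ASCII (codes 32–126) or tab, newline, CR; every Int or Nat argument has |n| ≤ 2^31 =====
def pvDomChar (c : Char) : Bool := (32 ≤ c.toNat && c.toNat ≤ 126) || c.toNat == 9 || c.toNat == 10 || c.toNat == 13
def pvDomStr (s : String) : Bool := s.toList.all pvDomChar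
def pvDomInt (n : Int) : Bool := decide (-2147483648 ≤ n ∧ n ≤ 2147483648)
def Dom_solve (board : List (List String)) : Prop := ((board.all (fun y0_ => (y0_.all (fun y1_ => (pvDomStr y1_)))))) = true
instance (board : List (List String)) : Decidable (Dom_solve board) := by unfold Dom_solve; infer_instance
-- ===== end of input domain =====

-- B is O(n^2) where A is O(n^3): instead of rescanning the affected lines after
-- every adjacent swap, B precomputes run-length arrays (pref, suf and their
-- running maxima) once per row and column and evaluates each swap in O(1) by
-- closed formulas; the board is never mutated (A mutates it but always restores
-- it, so the equivalence is about the value).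

-- ===== PORT A =====
-- board[y][x] (used only where Python's indices are in range; default "" / [] never read under Pre_)
def pvGet2 (b : List (List String)) (y x : Int) : String :=
  PySem.List.pyGetD (PySem.List.pyGetD b y []) x ""

-- swap(board, (y,x), (y1,x1)): tuple assignment, RHS first, then board[y][x], then board[y1][x1]
def pvSwap (b : List (List String)) (y x y1 x1 : Int) : List (List String) :=
  let r0 := pvGet2 b y1 x1
  let r1 := pvGet2 b y x
  let b1 := PySem.List.pySetD b y (PySem.List.pySetD (PySem.List.pyGetD b y []) x r0)
  PySem.List.pySetD b1 y1 (PySem.List.pySetD (PySem.List.pyGetD b1 y1 []) x1 r1)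

-- check(board, (start_row,start_col), (end_row,end_col))
def pvCheck (b : List (List String)) (sr sc er ec : Int) : Int :=
  let n := PySem.List.len b
  let ans : Int := -1
  let ans := (PySem.List.pyRange sr (er + 1) 1).foldl (fun ans row =>
      ((PySem.List.pyRange 0 (n - 1) 1).foldl (fun (p : Int × Int) x =>
          let cnt := if pvGet2 b row x == pvGet2 b row (x + 1) then p.1 + 1 else 1
          (cnt, max p.2 cnt)) (1, ans)).2) ans
  (PySem.List.pyRange sc (ec + 1) 1).foldl (fun ans col =>
      ((PySem.List.pyRange 0 (n - 1) 1).foldl (fun (p : Int × Int) y =>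
          let cnt := if pvGet2 b y col == pvGet2 b (y + 1) col then p.1 + 1 else 1
          (cnt, max p.2 cnt)) (1, ans)).2) ans

def solve (board : List (List String)) : Int :=
  let n := PySem.List.len board
  (PySem.List.pyRange 0 n 1).foldl (fun ans y =>
    (PySem.List.pyRange 0 n 1).foldl (fun ans x =>
      let ans := if x < n - 1 then
          max ans (pvCheck (pvSwap board y x y (x + 1)) y x y (x + 1))
        else ans
      if y < n - 1 then
          max ans (pvCheck (pvSwap board y x (y + 1) x) y x (y + 1) x)
        else ans) ans) (-1)

-- ===== PORT B =====
-- arrays(line): run-length data of one line, built once.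
-- pref[i] = length of the equal-run ending at i (left-to-right scan carrying c);
-- suf = pref of the reversed line, reversed back (line[::-1] is List.reverse,
-- exact by PySem.List.slice?_none_none_neg_one); premax/sufmax are running maxima.
def pvArrays (line : List String) :
    List String × List Int × List Int × List Int × List Int :=
  let pref := ((line.zip line.tail).foldl
      (fun (p : List Int × Int) uw =>
        (p.1 ++ [if uw.1 == uw.2 then p.2 + 1 else 1],
         if uw.1 == uw.2 then p.2 + 1 else 1)) ([1], 1)).1
  let rev := line.reverse
  let rp := ((rev.zip rev.tail).foldl
      (fun (p : List Int × Int) uw =>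
        (p.1 ++ [if uw.1 == uw.2 then p.2 + 1 else 1],
         if uw.1 == uw.2 then p.2 + 1 else 1)) ([1], 1)).1
  let suf := rp.reverse
  let premax := (pref.foldl
      (fun (p : List Int × Int) q => (p.1 ++ [max p.2 q], max p.2 q)) ([0], 0)).1
  let sm := (rp.foldl
      (fun (p : List Int × Int) q => (p.1 ++ [max p.2 q], max p.2 q)) ([0], 0)).1
  let sufmax := sm.reverse
  (line, pref, suf, premax, sufmax)

-- replace(ar, x, v): longest run of the line after setting line[x] = v
def pvReplace (n : Int) (ar : List String × List Int × List Int × List Int × List Int)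
    (x : Int) (v : String) : Int :=
  let line := ar.1
  let pref := ar.2.1
  let suf := ar.2.2.1
  let premax := ar.2.2.2.1
  let sufmax := ar.2.2.2.2
  let left : Int := if 0 < x ∧ PySem.List.pyGetD line (x - 1) "" = v
    then PySem.List.pyGetD pref (x - 1) 0 else 0
  let right : Int := if x + 1 < n ∧ PySem.List.pyGetD line (x + 1) "" = v
    then PySem.List.pyGetD suf (x + 1) 0 else 0
  max (max (PySem.List.pyGetD premax x 0) (PySem.List.pyGetD sufmax (x + 1) 0))
    (left + 1 + right)

-- pairswap(ar, x): longest run of the line after swapping line[x] and line[x+1]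
def pvPairswap (n : Int) (ar : List String × List Int × List Int × List Int × List Int)
    (x : Int) : Int :=
  let line := ar.1
  let pref := ar.2.1
  let suf := ar.2.2.1
  let premax := ar.2.2.2.1
  let sufmax := ar.2.2.2.2
  let a := PySem.List.pyGetD line x ""
  let b := PySem.List.pyGetD line (x + 1) ""
  if a = b then PySem.List.pyGetD premax n 0
  else
    let left : Int := (if 0 < x ∧ PySem.List.pyGetD line (x - 1) "" = b
      then PySem.List.pyGetD pref (x - 1) 0 else 0) + 1
    let right : Int := 1 + (if x + 2 < n ∧ PySem.List.pyGetD line (x + 2) "" = a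
      then PySem.List.pyGetD suf (x + 2) 0 else 0)
    max (max (max (PySem.List.pyGetD premax x 0) (PySem.List.pyGetD sufmax (x + 2) 0))
      left) right

def solve_alt (board : List (List String)) : Int :=
  let n := PySem.List.len board
  if n < 2 then -1 else
  let rows := board.map (fun r => pvArrays (PySem.List.slice r none (some n)))
  let cols := (PySem.List.pyRange 0 n 1).map (fun x =>
      pvArrays (board.map (fun r => PySem.List.pyGetD r x "")))
  let d : List String × List Int × List Int × List Int × List Int := ([], [], [], [], [])
  let best : Int := -1
  let best := (PySem.List.pyRange 0 n 1).foldl (fun best y =>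
    (PySem.List.pyRange 0 (n - 1) 1).foldl (fun best x =>
      -- horizontal swap (y,x)-(y,x+1)
      let a := PySem.List.pyGetD (PySem.List.pyGetD board y []) x ""
      let b := PySem.List.pyGetD (PySem.List.pyGetD board y []) (x + 1) ""
      max (max (max best (pvPairswap n (PySem.List.pyGetD rows y d) x))
          (pvReplace n (PySem.List.pyGetD cols x d) y b))
        (pvReplace n (PySem.List.pyGetD cols (x + 1) d) y a)) best) best
  (PySem.List.pyRange 0 (n - 1) 1).foldl (fun best y =>
    (PySem.List.pyRange 0 n 1).foldl (fun best x =>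
      -- vertical swap (y,x)-(y+1,x)
      let a := PySem.List.pyGetD (PySem.List.pyGetD board y []) x ""
      let b := PySem.List.pyGetD (PySem.List.pyGetD board (y + 1) []) x ""
      max (max (max best (pvReplace n (PySem.List.pyGetD rows y d) x b))
          (pvReplace n (PySem.List.pyGetD rows (y + 1) d) x a))
        (pvPairswap n (PySem.List.pyGetD cols x d) y)) best) best

-- ===== PRECONDITION & SPEC =====
-- A raises IndexError exactly when the board has ≥ 2 rows and some row is shorter
-- than the number of rows (its row scans read the first n columns of every row).
def Pre_solve (board : List (List String)) : Prop :=
  board.length ≤ 1 ∨ ∀ r ∈ board, board.length ≤ r.length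
instance (board : List (List String)) : Decidable (Pre_solve board) := by
  unfold Pre_solve; infer_instance

def pvWitness_solve : List (List String) := [["a", "b"], ["b", "a"]]

def Spec_solve (board : List (List String)) (out : Int) : Prop := out = solve_alt board
instance (board : List (List String)) (out : Int) : Decidable (Spec_solve board out) := by
  unfold Spec_solve; infer_instance

-- ===== CLAIM (what is proved, stated in full; the proofs are below) =====
def Claim_equal_solve : Prop := ∀ (board : List (List String)),
  Dom_solve board → Pre_solve board → Spec_solve board (solve board)

-- ===== LEMMAS AND PROOFS =====

-- A's run-scan step (cnt, ans), as a named function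
def pvAStep (u v : String) (p : Int × Int) : Int × Int :=
  (if u == v then p.1 + 1 else 1, max p.2 (if u == v then p.1 + 1 else 1))

-- A's inner run scan, over Nat indices into an element function
def pvAScan (f : Nat → String) (k : Nat) (st : Int × Int) : Int × Int :=
  (List.range k).foldl (fun p i => pvAStep (f i) (f (i + 1)) p) st

lemma pvAScan_succ (f : Nat → String) (k : Nat) (st : Int × Int) :
    pvAScan f (k + 1) st = pvAStep (f k) (f (k + 1)) (pvAScan f k st) := by
  simp [pvAScan, List.range_succ, List.foldl_append]

lemma pvAScan_congr (f g : Nat → String) (k : Nat) (st : Int × Int)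
    (h : ∀ i ≤ k, f i = g i) : pvAScan f k st = pvAScan g k st := by
  unfold pvAScan
  refine PySem.List.foldl_congr_mem _ _ _ _ ?_
  intro p i hi
  rw [List.mem_range] at hi
  rw [h i (by omega), h (i + 1) (by omega)]

-- generic list-access facts used on both sides
lemma pvGetD_set {α : Type} (l : List α) (i j : Nat) (v d : α) (hi : i < l.length) :
    (l.set i v).getD j d = if j = i then v else l.getD j d := by
  rw [List.getD_eq_getElem?_getD, List.getD_eq_getElem?_getD, List.getElem?_set]
  by_cases h : i = j
  · subst h; simp [hi]
  · simp [h, Ne.symm h]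

lemma pvGetD_mapf {α β : Type} (l : List α) (f : α → β) (j : Nat) (d : β) (e : α)
    (h : j < l.length) : (l.map f).getD j d = f (l.getD j e) := by
  rw [List.getD_eq_getElem?_getD, List.getElem?_map, List.getElem?_eq_getElem h]
  simp [List.getD_eq_getElem?_getD, List.getElem?_eq_getElem h]

lemma pvGetD_take {α : Type} (l : List α) (n i : Nat) (d : α) (h : i < n) :
    (l.take n).getD i d = l.getD i d := by
  rw [List.getD_eq_getElem?_getD, List.getD_eq_getElem?_getD, List.getElem?_take]
  simp [h]

lemma pvGetD_reverse {α : Type} (l : List α) (i : Nat) (d : α) (hi : i < l.length) :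
    l.reverse.getD i d = l.getD (l.length - 1 - i) d := by
  rw [List.getD_eq_getElem?_getD, List.getD_eq_getElem?_getD,
    List.getElem?_reverse hi]

-- reads of the original board, Nat indices
def pvG (board : List (List String)) (y x : Nat) : String := (board.getD y []).getD x ""

-- the three lines affected by a horizontal swap at (y,x)-(y,x+1), as element functions
def pvHRow (board : List (List String)) (y x : Nat) : Nat → String := fun i =>
  if i = x then pvG board y (x + 1) else if i = x + 1 then pvG board y x else pvG board y i
def pvHCol1 (board : List (List String)) (y x : Nat) : Nat → String := fun j =>
  if j = y then pvG board y (x + 1) else pvG board j x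
def pvHCol2 (board : List (List String)) (y x : Nat) : Nat → String := fun j =>
  if j = y then pvG board y x else pvG board j (x + 1)
-- the three lines affected by a vertical swap at (y,x)-(y+1,x)
def pvVRow1 (board : List (List String)) (y x : Nat) : Nat → String := fun i =>
  if i = x then pvG board (y + 1) x else pvG board y i
def pvVRow2 (board : List (List String)) (y x : Nat) : Nat → String := fun i =>
  if i = x then pvG board y x else pvG board (y + 1) i
def pvVCol (board : List (List String)) (y x : Nat) : Nat → String := fun j =>
  if j = y then pvG board (y + 1) x else if j = y + 1 then pvG board y x else pvG board j x

def pvW (f : Nat → String) (k : Nat) : Int := (pvAScan f k (1, -1)).2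

-- the cnt component does not depend on the ans component
lemma pvAScan_fst (f : Nat → String) (k : Nat) (c a b : Int) :
    (pvAScan f k (c, a)).1 = (pvAScan f k (c, b)).1 := by
  induction k generalizing c a b with
  | zero => simp [pvAScan]
  | succ k ih =>
    rw [pvAScan_succ, pvAScan_succ]
    rw [show pvAScan f k (c, a) = ((pvAScan f k (c, a)).1, (pvAScan f k (c, a)).2) from rfl,
        show pvAScan f k (c, b) = ((pvAScan f k (c, b)).1, (pvAScan f k (c, b)).2) from rfl,
        ih c a b]
    simp [pvAStep]

-- threading the running max through a scan
lemma pvAScan_thread (f : Nat → String) (k : Nat) (c a : Int) (ha : -1 ≤ a) :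
    (pvAScan f k (c, a)).2 = max a (pvAScan f k (c, -1)).2 := by
  induction k generalizing c a with
  | zero =>
    simp [pvAScan]
    exact ha
  | succ k ih =>
    rw [pvAScan_succ, pvAScan_succ]
    rw [show pvAScan f k (c, a) = ((pvAScan f k (c, a)).1, (pvAScan f k (c, a)).2) from rfl,
        show pvAScan f k (c, -1) = ((pvAScan f k (c, -1)).1, (pvAScan f k (c, -1)).2) from rfl,
        pvAScan_fst f k c a (-1), ih c a ha]
    simp [pvAStep]

lemma pvAScan_le (f : Nat → String) (k : Nat) (c a : Int) :
    a ≤ (pvAScan f k (c, a)).2 := by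
  induction k generalizing c a with
  | zero => simp [pvAScan]
  | succ k ih =>
    rw [pvAScan_succ]
    rw [show pvAScan f k (c, a) = ((pvAScan f k (c, a)).1, (pvAScan f k (c, a)).2) from rfl]
    exact le_trans (ih c a) (le_max_left _ _)

-- the swapped boards, written as set-chains over the original board
lemma pvSwapH_eq (board : List (List String)) (y x : Nat) (hy : y < board.length) :
    pvSwap board (y : Int) (x : Int) (y : Int) ((x : Int) + 1)
      = board.set y (((board.getD y []).set x (pvG board y (x + 1))).set (x + 1) (pvG board y x)) := by
  unfold pvSwap pvGet2
  have hx1 : (x : Int) + 1 = ((x + 1 : Nat) : Int) := by push_cast; ring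
  rw [hx1]
  simp only [PySem.List.pyGetD_natCast, PySem.List.pySetD_natCast]
  rw [pvGetD_set board y y _ [] hy]
  simp [pvG, List.set_set]

lemma pvSwapV_eq (board : List (List String)) (y x : Nat) (hy : y + 1 < board.length) :
    pvSwap board (y : Int) (x : Int) ((y : Int) + 1) (x : Int)
      = (board.set y ((board.getD y []).set x (pvG board (y + 1) x))).set (y + 1)
          ((board.getD (y + 1) []).set x (pvG board y x)) := by
  unfold pvSwap pvGet2
  have hy1 : (y : Int) + 1 = ((y + 1 : Nat) : Int) := by push_cast; ring
  rw [hy1]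
  simp only [PySem.List.pyGetD_natCast, PySem.List.pySetD_natCast]
  rw [pvGetD_set board y (y + 1) _ [] (by omega)]
  simp [pvG]

lemma pvRowLen (board : List (List String)) (hrow : ∀ r ∈ board, board.length ≤ r.length)
    (j : Nat) (hj : j < board.length) : board.length ≤ (board.getD j []).length := by
  refine hrow _ ?_
  rw [List.getD_eq_getElem?_getD, List.getElem?_eq_getElem hj]
  exact List.getElem_mem hj

-- reading the horizontally swapped board
lemma pvGet2_swapH (board : List (List String)) (y x j i : Nat)
    (hy : y < board.length) (hx : x + 1 < (board.getD y []).length) :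
    pvGet2 (board.set y (((board.getD y []).set x (pvG board y (x + 1))).set (x + 1) (pvG board y x)))
        (j : Int) (i : Int)
      = if j = y then pvHRow board y x i else pvG board j i := by
  unfold pvGet2 pvHRow
  simp only [PySem.List.pyGetD_natCast]
  rw [pvGetD_set board y j _ [] hy]
  by_cases hj : j = y
  · simp only [hj, if_true]
    rw [pvGetD_set _ (x + 1) i _ "" (by simpa using hx)]
    rw [pvGetD_set _ x i _ "" (by omega)]
    unfold pvG
    split_ifs <;> first | rfl | omega
  · simp [hj, pvG]

-- reading the vertically swapped board
lemma pvGet2_swapV (board : List (List String)) (y x j i : Nat)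
    (hy : y + 1 < board.length)
    (hxy : x < (board.getD y []).length) (hxy1 : x < (board.getD (y + 1) []).length) :
    pvGet2 ((board.set y ((board.getD y []).set x (pvG board (y + 1) x))).set (y + 1)
        ((board.getD (y + 1) []).set x (pvG board y x))) (j : Int) (i : Int)
      = if j = y then (if i = x then pvG board (y + 1) x else pvG board y i)
        else if j = y + 1 then (if i = x then pvG board y x else pvG board (y + 1) i)
        else pvG board j i := by
  unfold pvGet2
  simp only [PySem.List.pyGetD_natCast]
  rw [pvGetD_set _ (y + 1) j _ [] (by simpa using hy)]
  by_cases hj1 : j = y + 1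
  · rw [if_pos hj1, if_neg (by omega), if_pos hj1]
    rw [pvGetD_set _ x i _ "" hxy1]
    unfold pvG
    split_ifs <;> rfl
  · rw [if_neg hj1, pvGetD_set board y j _ [] (by omega)]
    by_cases hj : j = y
    · rw [if_pos hj, if_pos hj, pvGetD_set _ x i _ "" hxy]
      unfold pvG
      split_ifs <;> rfl
    · simp [hj, hj1, pvG]

-- pvCheck's inner index loop is pvAScan
lemma pvInner_eq_aScan (F : Int → String) (k : Nat) (st : Int × Int) :
    (PySem.List.pyRange 0 (k : Int) 1).foldl
      (fun (p : Int × Int) x =>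
        let cnt := if F x == F (x + 1) then p.1 + 1 else 1
        (cnt, max p.2 cnt)) st
    = pvAScan (fun i => F (i : Int)) k st := by
  rw [PySem.List.pyRange_zero_natCast, List.foldl_map]
  unfold pvAScan
  refine PySem.List.foldl_congr_mem _ _ _ _ ?_
  intro p i hi
  have hc : ((i : Int) + 1) = ((i + 1 : Nat) : Int) := by push_cast; ring
  unfold pvAStep
  rw [hc]

-- check after a horizontal swap: the maxima of the three affected lines
lemma pvCheck_H (board : List (List String)) (n y x : Nat) (hn : board.length = n)
    (hrow : ∀ r ∈ board, board.length ≤ r.length) (hy : y < n) (hx : x + 1 < n) :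
    pvCheck (pvSwap board (y : Int) (x : Int) (y : Int) ((x : Int) + 1))
        (y : Int) (x : Int) (y : Int) ((x : Int) + 1)
      = max (max (pvW (pvHRow board y x) (n - 1)) (pvW (pvHCol1 board y x) (n - 1)))
          (pvW (pvHCol2 board y x) (n - 1)) := by
  have hxr : x + 1 < (board.getD y []).length :=
    lt_of_lt_of_le (by omega) (pvRowLen board hrow y (by omega))
  rw [pvSwapH_eq board y x (by omega)]
  set b' := board.set y (((board.getD y []).set x (pvG board y (x + 1))).set (x + 1) (pvG board y x)) with hb'
  have hlb' : b'.length = n := by rw [hb']; simp [hn]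
  unfold pvCheck
  simp only [PySem.List.len_eq, hlb']
  have hcast : (n : Int) - 1 = ((n - 1 : Nat) : Int) := by omega
  rw [hcast]
  rw [PySem.List.pyRange_one_singleton]
  rw [PySem.List.pyRange_one_cons (show (x : Int) < (x : Int) + 1 + 1 by omega),
      PySem.List.pyRange_one_singleton]
  simp only [List.foldl_cons, List.foldl_nil]
  rw [pvInner_eq_aScan (fun q => pvGet2 b' (y : Int) q) (n - 1),
      pvInner_eq_aScan (fun q => pvGet2 b' q (x : Int)) (n - 1),
      pvInner_eq_aScan (fun q => pvGet2 b' q ((x : Int) + 1)) (n - 1)]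
  have e1 : ∀ st, pvAScan (fun i => pvGet2 b' (y : Int) (i : Int)) (n - 1) st
      = pvAScan (pvHRow board y x) (n - 1) st := fun st =>
    pvAScan_congr _ _ _ _ (fun i _ => by
      rw [pvGet2_swapH board y x y i (by omega) hxr]; simp)
  have e2 : ∀ st, pvAScan (fun j => pvGet2 b' (j : Int) (x : Int)) (n - 1) st
      = pvAScan (pvHCol1 board y x) (n - 1) st := fun st =>
    pvAScan_congr _ _ _ _ (fun j _ => by
      rw [pvGet2_swapH board y x j x (by omega) hxr]
      unfold pvHCol1 pvHRow
      split_ifs <;> first | rfl | omega)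
  have e3 : ∀ st, pvAScan (fun j => pvGet2 b' (j : Int) ((x : Int) + 1)) (n - 1) st
      = pvAScan (pvHCol2 board y x) (n - 1) st := fun st =>
    pvAScan_congr _ _ _ _ (fun j _ => by
      have hc2 : ((x : Int) + 1) = ((x + 1 : Nat) : Int) := by push_cast; ring
      rw [hc2, pvGet2_swapH board y x j (x + 1) (by omega) hxr]
      unfold pvHCol2 pvHRow
      split_ifs <;> first | rfl | omega)
  simp only [e1, e2, e3]
  rw [pvAScan_thread _ _ _ _ (pvAScan_le _ _ _ _)]
  rw [pvAScan_thread _ _ _ _ (le_trans (pvAScan_le _ _ _ _) (le_max_left _ _))]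
  rfl

-- check after a vertical swap
lemma pvCheck_V (board : List (List String)) (n y x : Nat) (hn : board.length = n)
    (hrow : ∀ r ∈ board, board.length ≤ r.length) (hy : y + 1 < n) (hx : x < n) :
    pvCheck (pvSwap board (y : Int) (x : Int) ((y : Int) + 1) (x : Int))
        (y : Int) (x : Int) ((y : Int) + 1) (x : Int)
      = max (max (pvW (pvVRow1 board y x) (n - 1)) (pvW (pvVRow2 board y x) (n - 1)))
          (pvW (pvVCol board y x) (n - 1)) := by
  have hxr : x < (board.getD y []).length :=
    lt_of_lt_of_le (by omega) (pvRowLen board hrow y (by omega))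
  have hxr1 : x < (board.getD (y + 1) []).length :=
    lt_of_lt_of_le (by omega) (pvRowLen board hrow (y + 1) (by omega))
  rw [pvSwapV_eq board y x (by omega)]
  set b' := (board.set y ((board.getD y []).set x (pvG board (y + 1) x))).set (y + 1)
      ((board.getD (y + 1) []).set x (pvG board y x)) with hb'
  have hlb' : b'.length = n := by rw [hb']; simp [hn]
  unfold pvCheck
  simp only [PySem.List.len_eq, hlb']
  have hcast : (n : Int) - 1 = ((n - 1 : Nat) : Int) := by omega
  rw [hcast]
  rw [PySem.List.pyRange_one_cons (show (y : Int) < (y : Int) + 1 + 1 by omega),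
      PySem.List.pyRange_one_singleton, PySem.List.pyRange_one_singleton]
  simp only [List.foldl_cons, List.foldl_nil]
  rw [pvInner_eq_aScan (fun q => pvGet2 b' (y : Int) q) (n - 1),
      pvInner_eq_aScan (fun q => pvGet2 b' ((y : Int) + 1) q) (n - 1),
      pvInner_eq_aScan (fun q => pvGet2 b' q (x : Int)) (n - 1)]
  have e1 : ∀ st, pvAScan (fun i => pvGet2 b' (y : Int) (i : Int)) (n - 1) st
      = pvAScan (pvVRow1 board y x) (n - 1) st := fun st =>
    pvAScan_congr _ _ _ _ (fun i _ => by
      rw [pvGet2_swapV board y x y i (by omega) hxr hxr1]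
      unfold pvVRow1
      split_ifs <;> first | rfl | omega)
  have e2 : ∀ st, pvAScan (fun i => pvGet2 b' ((y : Int) + 1) (i : Int)) (n - 1) st
      = pvAScan (pvVRow2 board y x) (n - 1) st := fun st =>
    pvAScan_congr _ _ _ _ (fun i _ => by
      have hc2 : ((y : Int) + 1) = ((y + 1 : Nat) : Int) := by push_cast; ring
      rw [hc2, pvGet2_swapV board y x (y + 1) i (by omega) hxr hxr1]
      unfold pvVRow2
      split_ifs <;> first | rfl | omega)
  have e3 : ∀ st, pvAScan (fun j => pvGet2 b' (j : Int) (x : Int)) (n - 1) st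
      = pvAScan (pvVCol board y x) (n - 1) st := fun st =>
    pvAScan_congr _ _ _ _ (fun j _ => by
      rw [pvGet2_swapV board y x j x (by omega) hxr hxr1]
      unfold pvVCol
      split_ifs <;> first | rfl | omega)
  simp only [e1, e2, e3]
  rw [pvAScan_thread _ _ _ _ (pvAScan_le _ _ _ _)]
  rw [pvAScan_thread _ _ _ _ (le_trans (pvAScan_le _ _ _ _) (le_max_left _ _))]
  rfl

-- contribution triples of one swap, and the three flattened contribution lists
def pvHVal (board : List (List String)) (n y x : Nat) : List Int :=
  [pvW (pvHRow board y x) (n - 1), pvW (pvHCol1 board y x) (n - 1), pvW (pvHCol2 board y x) (n - 1)]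
def pvVVal (board : List (List String)) (n y x : Nat) : List Int :=
  [pvW (pvVRow1 board y x) (n - 1), pvW (pvVRow2 board y x) (n - 1), pvW (pvVCol board y x) (n - 1)]

def pvLA (board : List (List String)) (n : Nat) : List Int :=
  (List.range n).flatMap (fun y => (List.range n).flatMap (fun x =>
    (if x < n - 1 then pvHVal board n y x else []) ++ (if y < n - 1 then pvVVal board n y x else [])))
def pvLH (board : List (List String)) (n : Nat) : List Int :=
  (List.range n).flatMap (fun y => (List.range (n - 1)).flatMap (fun x => pvHVal board n y x))
def pvLV (board : List (List String)) (n : Nat) : List Int :=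
  (List.range (n - 1)).flatMap (fun y => (List.range n).flatMap (fun x => pvVVal board n y x))

lemma pvFoldlMax_flat (l : List Nat) (g : Nat → List Int) (a : Int) :
    l.foldl (fun acc k => (g k).foldl max acc) a = (l.flatMap g).foldl max a := by
  induction l generalizing a with
  | nil => rfl
  | cons h t ih => rw [List.foldl_cons, ih, List.flatMap_cons, List.foldl_append]

lemma pvPerm_flatMap (l : List Nat) (f g : Nat → List Int)
    (h : ∀ y ∈ l, (f y).Perm (g y)) : (l.flatMap f).Perm (l.flatMap g) := by
  induction l with
  | nil => simp
  | cons a t ih =>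
    rw [List.flatMap_cons, List.flatMap_cons]
    exact (h a (by simp)).append (ih (fun y hy => h y (by simp [hy])))

-- the interleaved contribution list is a permutation of B's two separate ones
lemma pvFlatMap_guard (n : Nat) (h1 : 1 ≤ n) (F : Nat → List Int) :
    (List.range n).flatMap (fun k => if k < n - 1 then F k else [])
      = (List.range (n - 1)).flatMap F := by
  obtain ⟨m, rfl⟩ : ∃ m, n = m + 1 := ⟨n - 1, by omega⟩
  simp only [Nat.add_sub_cancel]
  rw [List.range_succ, List.flatMap_append]
  rw [List.flatMap_congr (fun k hk => if_pos (List.mem_range.mp hk))]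
  simp

lemma pvPerm_LA (board : List (List String)) (n : Nat) (h2 : 2 ≤ n) :
    (pvLA board n).Perm (pvLH board n ++ pvLV board n) := by
  unfold pvLA pvLH pvLV
  have hy2 : ∀ y, ((List.range n).flatMap (fun x =>
      (if x < n - 1 then pvHVal board n y x else []) ++ (if y < n - 1 then pvVVal board n y x else []))).Perm
      ((List.range (n - 1)).flatMap (fun x => pvHVal board n y x)
        ++ (if y < n - 1 then (List.range n).flatMap (fun x => pvVVal board n y x) else [])) := by
    intro y
    have e1 : (List.range n).flatMap (fun x => if x < n - 1 then pvHVal board n y x else [])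
        = (List.range (n - 1)).flatMap (fun x => pvHVal board n y x) :=
      pvFlatMap_guard n (by omega) _
    have e2 : (List.range n).flatMap (fun x => if y < n - 1 then pvVVal board n y x else [])
        = (if y < n - 1 then (List.range n).flatMap (fun x => pvVVal board n y x) else []) := by
      by_cases hy : y < n - 1
      · simp only [if_pos hy]
      · simp [hy]
    refine ((List.flatMap_append_perm _ _ _).symm).trans ?_
    rw [e1, e2]
  refine (pvPerm_flatMap _ _ _ (fun y _ => hy2 y)).trans ?_
  have e3 : (List.range n).flatMap (fun y =>
      if y < n - 1 then (List.range n).flatMap (fun x => pvVVal board n y x) else [])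
      = (List.range (n - 1)).flatMap (fun y => (List.range n).flatMap (fun x => pvVVal board n y x)) :=
    pvFlatMap_guard n (by omega) _
  refine ((List.flatMap_append_perm _ _ _).symm).trans ?_
  rw [e3]

-- A's solve as a max-fold over the interleaved contribution list
lemma pvSolve_eq (board : List (List String)) (n : Nat) (hn : board.length = n)
    (hrow : ∀ r ∈ board, board.length ≤ r.length) (h2 : 2 ≤ n) :
    solve board = (pvLA board n).foldl max (-1) := by
  unfold solve pvLA
  simp only [PySem.List.len_eq, hn]
  rw [PySem.List.pyRange_zero_natCast, List.foldl_map]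
  rw [← pvFoldlMax_flat]
  refine PySem.List.foldl_congr_mem _ _ _ _ ?_
  intro ans y hy
  have hyn : y < n := List.mem_range.mp hy
  rw [List.foldl_map]
  rw [← pvFoldlMax_flat]
  refine PySem.List.foldl_congr_mem _ _ _ _ ?_
  intro a x hx
  have hxn : x < n := List.mem_range.mp hx
  by_cases hx1 : x < n - 1
  · rw [if_pos (show (x : Int) < (n : Int) - 1 by omega)]
    rw [pvCheck_H board n y x hn hrow hyn (by omega)]
    by_cases hy1 : y < n - 1
    · rw [if_pos (show (y : Int) < (n : Int) - 1 by omega)]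
      rw [pvCheck_V board n y x hn hrow (by omega) hxn]
      rw [if_pos hx1, if_pos hy1]
      simp only [pvHVal, pvVVal, List.cons_append, List.nil_append,
        List.foldl_cons, List.foldl_nil]
      ac_rfl
    · rw [if_neg (show ¬ ((y : Int) < (n : Int) - 1) by omega)]
      rw [if_pos hx1, if_neg hy1]
      simp only [pvHVal, List.append_nil, List.foldl_cons, List.foldl_nil]
      ac_rfl
  · rw [if_neg (show ¬ ((x : Int) < (n : Int) - 1) by omega)]
    by_cases hy1 : y < n - 1
    · rw [if_pos (show (y : Int) < (n : Int) - 1 by omega)]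
      rw [pvCheck_V board n y x hn hrow (by omega) hxn]
      rw [if_neg hx1, if_pos hy1]
      simp only [pvVVal, List.nil_append, List.foldl_cons, List.foldl_nil]
      ac_rfl
    · rw [if_neg (show ¬ ((y : Int) < (n : Int) - 1) by omega)]
      rw [if_neg hx1, if_neg hy1]
      simp

-- B's column list of the original board
def pvColL (board : List (List String)) (x : Nat) : List String :=
  board.map (fun r => r.getD x "")

lemma pvColL_getD (board : List (List String)) (x j : Nat) (hj : j < board.length) :
    (pvColL board x).getD j "" = pvG board j x := by
  unfold pvColL pvG
  exact pvGetD_mapf board _ j "" [] hj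

-- ===== B-side theory: runs via pref/suf arrays =====

-- length of the equal-run ending at i in the line given by f
def pvPref (f : Nat → String) : Nat → Nat
  | 0 => 1
  | i + 1 => if f i = f (i + 1) then pvPref f i + 1 else 1

-- length of the equal-run starting at i in the length-n line: pref of the reversal
def pvSuf (f : Nat → String) (n i : Nat) : Nat := pvPref (fun j => f (n - 1 - j)) (n - 1 - i)

-- max pref over the first x positions / max suf over positions in [x, n)
def pvPm (f : Nat → String) (x : Nat) : Nat := (Finset.range x).sup (pvPref f)
def pvSm (f : Nat → String) (n x : Nat) : Nat := (Finset.Ico x n).sup (pvSuf f n)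

lemma pvPref_pos (f : Nat → String) (i : Nat) : 1 ≤ pvPref f i := by
  cases i with
  | zero => simp [pvPref]
  | succ i => simp only [pvPref]; split <;> omega

lemma pvPref_le (f : Nat → String) (i : Nat) : pvPref f i ≤ i + 1 := by
  induction i with
  | zero => simp [pvPref]
  | succ i ih => simp only [pvPref]; split <;> omega

lemma pvPref_run (f : Nat → String) (i : Nat) : ∀ j < pvPref f i, f (i - j) = f i := by
  induction i with
  | zero =>
    intro j hj
    simp only [pvPref] at hj
    interval_cases j
    rfl
  | succ i ih =>
    intro j hj
    simp only [pvPref] at hj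
    by_cases h : f i = f (i + 1)
    · rw [if_pos h] at hj
      cases j with
      | zero => rfl
      | succ j' =>
        have e : i + 1 - (j' + 1) = i - j' := by omega
        rw [e, ih j' (by omega), h]
    · rw [if_neg h] at hj
      interval_cases j; rfl

lemma pvPref_max (f : Nat → String) :
    ∀ (i s : Nat), s ≤ i → (∀ j, s ≤ j → j ≤ i → f j = f i) → i - s + 1 ≤ pvPref f i := by
  intro i
  induction i with
  | zero => intro s hs _; interval_cases s; simp [pvPref]
  | succ i ih =>
    intro s hs h
    by_cases hsi : s = i + 1
    · subst hsi; simpa using pvPref_pos f (i + 1)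
    · have hs' : s ≤ i := by omega
      have hfi : f i = f (i + 1) := h i (by omega) (by omega)
      have := ih s hs' (fun j h1 h2 => by
        rw [h j h1 (by omega), ← hfi])
      simp only [pvPref, if_pos hfi]
      omega

lemma pvPref_congr (f f' : Nat → String) (i : Nat) (h : ∀ j ≤ i, f j = f' j) :
    pvPref f i = pvPref f' i := by
  induction i with
  | zero => rfl
  | succ i ih =>
    simp only [pvPref]
    rw [h i (by omega), h (i + 1) (by omega),
      ih (fun j hj => h j (by omega))]

lemma pvSuf_pos (f : Nat → String) (n i : Nat) : 1 ≤ pvSuf f n i := pvPref_pos _ _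

lemma pvSuf_le (f : Nat → String) (n i : Nat) (hi : i < n) : i + pvSuf f n i ≤ n := by
  have := pvPref_le (fun j => f (n - 1 - j)) (n - 1 - i)
  unfold pvSuf
  omega

lemma pvSuf_run (f : Nat → String) (n i : Nat) (hi : i < n) :
    ∀ j < pvSuf f n i, f (i + j) = f i := by
  intro j hj
  have hle := pvSuf_le f n i hi
  have h := pvPref_run (fun j => f (n - 1 - j)) (n - 1 - i) j (by exact hj)
  simp only at h
  have e1 : n - 1 - (n - 1 - i - j) = i + j := by omega
  have e2 : n - 1 - (n - 1 - i) = i := by omega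
  rw [e1, e2] at h
  exact h

lemma pvSuf_max (f : Nat → String) (n i e : Nat) (hie : i ≤ e) (he : e < n)
    (h : ∀ j, i ≤ j → j ≤ e → f j = f i) : e - i + 1 ≤ pvSuf f n i := by
  have key := pvPref_max (fun j => f (n - 1 - j)) (n - 1 - i) (n - 1 - e) (by omega)
    (fun j h1 h2 => by
      simp only
      have e2 : n - 1 - (n - 1 - i) = i := by omega
      rw [e2, h (n - 1 - j) (by omega) (by omega)])
  unfold pvSuf
  omega

lemma le_pvPm (f : Nat → String) (x i : Nat) (hi : i < x) : pvPref f i ≤ pvPm f x :=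
  Finset.le_sup (Finset.mem_range.mpr hi)

lemma pvPm_le (f : Nat → String) (x c : Nat) (h : ∀ i < x, pvPref f i ≤ c) :
    pvPm f x ≤ c :=
  Finset.sup_le (fun i hi => h i (Finset.mem_range.mp hi))

lemma le_pvSm (f : Nat → String) (n x i : Nat) (h1 : x ≤ i) (h2 : i < n) :
    pvSuf f n i ≤ pvSm f n x :=
  Finset.le_sup (Finset.mem_Ico.mpr ⟨h1, h2⟩)

lemma pvSm_le (f : Nat → String) (n x c : Nat) (h : ∀ i, x ≤ i → i < n → pvSuf f n i ≤ c) :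
    pvSm f n x ≤ c :=
  Finset.sup_le (fun i hi => h i (Finset.mem_Ico.mp hi).1 (Finset.mem_Ico.mp hi).2)

lemma pvPm_congr (f f' : Nat → String) (n : Nat) (h : ∀ j < n, f j = f' j) :
    pvPm f n = pvPm f' n := by
  unfold pvPm
  refine Finset.sup_congr rfl ?_
  intro i hi
  exact pvPref_congr _ _ _ (fun j hj =>
    h j (lt_of_le_of_lt hj (Finset.mem_range.mp hi)))

lemma pvPm_succ (f : Nat → String) (k : Nat) :
    pvPm f (k + 1) = max (pvPm f k) (pvPref f k) := by
  unfold pvPm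
  rw [Finset.range_add_one, Finset.sup_insert]
  exact max_comm _ _

lemma pvPm_mono_congr (f g : Nat → String) (x n : Nat) (hxn : x ≤ n)
    (h : ∀ j < x, g j = f j) : pvPm f x ≤ pvPm g n := by
  apply pvPm_le
  intro i hi
  rw [show pvPref f i = pvPref g i from
    pvPref_congr f g i (fun j hj => (h j (by omega)).symm)]
  exact le_pvPm g n i (by omega)

lemma pvSm_le_pvPm (f g : Nat → String) (n t : Nat)
    (h : ∀ j, t ≤ j → j < n → g j = f j) : pvSm f n t ≤ pvPm g n := by
  apply pvSm_le
  intro i hti hin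
  have hs := pvSuf_pos f n i
  have hle := pvSuf_le f n i hin
  set s := pvSuf f n i with hsdef
  have he : i + s - 1 < n := by omega
  have hrun := pvSuf_run f n i hin
  have key := pvPref_max g (i + s - 1) i (by omega) ?_
  · have e : (i + s - 1) - i + 1 = s := by omega
    rw [e] at key
    exact key.trans (le_pvPm g n _ he)
  · intro j h1 h2
    have hj : g j = f i := by
      rw [h j (by omega) (by omega)]
      have := hrun (j - i) (by omega)
      rwa [show i + (j - i) = j by omega] at this
    have hje : g (i + s - 1) = f i := by
      rw [h _ (by omega) (by omega)]
      have := hrun (s - 1) (by omega)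
      rwa [show i + (s - 1) = i + s - 1 by omega] at this
    rw [hj, hje]

-- longest run after replacing position x by v, in terms of the original arrays
lemma pvPm_replace (f : Nat → String) (v : String) (n x : Nat) (hx : x < n) :
    pvPm (fun j => if j = x then v else f j) n
      = max (max (pvPm f x) (pvSm f n (x + 1)))
          ((if 0 < x ∧ f (x - 1) = v then pvPref f (x - 1) else 0) + 1
            + (if x + 1 < n ∧ f (x + 1) = v then pvSuf f n (x + 1) else 0)) := by
  set g : Nat → String := fun j => if j = x then v else f j with hg
  set L : Nat := if 0 < x ∧ f (x - 1) = v then pvPref f (x - 1) else 0 with hL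
  set R : Nat := if x + 1 < n ∧ f (x + 1) = v then pvSuf f n (x + 1) else 0 with hR
  have hgx : g x = v := by simp [hg]
  have hgne : ∀ j, j ≠ x → g j = f j := fun j h => by simp [hg, h]
  apply le_antisymm
  · apply pvPm_le
    intro i hi
    by_cases hix : i < x
    · rw [show pvPref g i = pvPref f i from
        pvPref_congr g f i (fun j hj => hgne j (by omega))]
      exact le_trans (le_pvPm f x i hix) (le_trans (le_max_left _ _) (le_max_left _ _))
    · push_neg at hix
      have hple := pvPref_le g i
      have hppos := pvPref_pos g i
      have hrun := pvPref_run g i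
      set p := pvPref g i with hp
      have hallrun : ∀ j, i + 1 - p ≤ j → j ≤ i → g j = g i := by
        intro j h1 h2
        have := hrun (i - j) (by omega)
        rwa [show i - (i - j) = j by omega] at this
      by_cases hs : p ≤ i - x
      · -- the run lies entirely in [x+1, i]
        have hs1 : x + 1 ≤ i + 1 - p := by omega
        have key := pvSuf_max f n (i + 1 - p) i (by omega) (by omega) ?_
        · have e : i - (i + 1 - p) + 1 = p := by omega
          rw [e] at key
          exact key.trans ((le_pvSm f n (x + 1) (i + 1 - p) hs1 (by omega)).trans
            (le_trans (le_max_right _ _) (le_max_left _ _)))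
        · intro j h1 h2
          rw [← hgne j (by omega), ← hgne (i + 1 - p) (by omega),
            hallrun j (by omega) (by omega), hallrun (i + 1 - p) (by omega) (by omega)]
      · push_neg at hs
        have hvi : g i = v := by
          have := hallrun x (by omega) (by omega)
          rw [← this, hgx]
        have hLb : x - (i + 1 - p) ≤ L := by
          by_cases hlt : i + 1 - p < x
          · have hfx1 : f (x - 1) = v := by
              rw [← hgne (x - 1) (by omega), hallrun (x - 1) (by omega) (by omega), hvi]
            rw [hL, if_pos ⟨by omega, hfx1⟩]
            have key := pvPref_max f (x - 1) (i + 1 - p) (by omega) ?_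
            · omega
            · intro j h1 h2
              rw [← hgne j (by omega), hallrun j (by omega) (by omega), hvi, hfx1]
          · omega
        have hRb : i - x ≤ R := by
          by_cases hxi : x < i
          · have hfx1 : f (x + 1) = v := by
              rw [← hgne (x + 1) (by omega), hallrun (x + 1) (by omega) (by omega), hvi]
            rw [hR, if_pos ⟨by omega, hfx1⟩]
            have key := pvSuf_max f n (x + 1) i (by omega) (by omega) ?_
            · omega
            · intro j h1 h2
              rw [← hgne j (by omega), hallrun j (by omega) (by omega), hvi, hfx1]
          · omega
        exact le_trans (by omega) (le_max_right (max (pvPm f x) (pvSm f n (x + 1))) (L + 1 + R))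
  · refine max_le (max_le ?_ ?_) ?_
    · exact pvPm_mono_congr f g x n (by omega) (fun j hj => hgne j (by omega))
    · exact pvSm_le_pvPm f g n (x + 1) (fun j h1 h2 => hgne j (by omega))
    · have hLx : L ≤ x := by
        rw [hL]; split
        · rename_i hc; exact le_trans (pvPref_le f (x - 1)) (by omega)
        · omega
      have hRn : x + 1 + R ≤ n ∨ R = 0 := by
        rw [hR]; split
        · rename_i hc; exact Or.inl (pvSuf_le f n (x + 1) hc.1)
        · exact Or.inr rfl
      have heLt : x + R < n := by rcases hRn with h | h <;> omega
      have hge : g (x + R) = v := by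
        by_cases hR0 : R = 0
        · rw [hR0]
          simpa using hgx
        · have hc : x + 1 < n ∧ f (x + 1) = v := by
            by_contra hcc
            exact hR0 (by rw [hR, if_neg hcc])
          have hRv : R = pvSuf f n (x + 1) := by rw [hR, if_pos hc]
          have hrn := pvSuf_run f n (x + 1) hc.1 (R - 1) (by omega)
          rw [show x + 1 + (R - 1) = x + R by omega] at hrn
          rw [hgne (x + R) (by omega), hrn, hc.2]
      have key := pvPref_max g (x + R) (x - L) (by omega) ?_
      · have e : (x + R) - (x - L) + 1 = L + 1 + R := by omega
        rw [e] at key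
        exact key.trans (le_pvPm g n _ heLt)
      · intro j h1 h2
        rw [hge]
        rcases Nat.lt_trichotomy j x with hlt | heq | hgt
        · have hL0 : 0 < L := by omega
          have hc : 0 < x ∧ f (x - 1) = v := by
            by_contra hcc
            rw [hL, if_neg hcc] at hL0
            omega
          have hLv : L = pvPref f (x - 1) := by rw [hL, if_pos hc]
          have hrn := pvPref_run f (x - 1) ((x - 1) - j) (by omega)
          rw [show (x - 1) - ((x - 1) - j) = j by omega] at hrn
          rw [hgne j (by omega), hrn, hc.2]
        · rw [heq, hgx]
        · have hR0 : 0 < R := by omega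
          have hc : x + 1 < n ∧ f (x + 1) = v := by
            by_contra hcc
            rw [hR, if_neg hcc] at hR0
            omega
          have hRv : R = pvSuf f n (x + 1) := by rw [hR, if_pos hc]
          have hrn := pvSuf_run f n (x + 1) hc.1 (j - (x + 1)) (by omega)
          rw [show x + 1 + (j - (x + 1)) = j by omega] at hrn
          rw [hgne j (by omega), hrn, hc.2]

lemma pvAScan_closed (f : Nat → String) (k : Nat) :
    pvAScan f k (1, -1)
      = ((pvPref f k : Int), if k = 0 then (-1 : Int) else ((pvPm f (k + 1) : Int))) := by
  induction k with
  | zero => simp [pvAScan, pvPref]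
  | succ k ih =>
    rw [pvAScan_succ, ih]
    unfold pvAStep
    simp only
    have hcnt : (if f k == f (k + 1) then (pvPref f k : Int) + 1 else 1)
        = (pvPref f (k + 1) : Int) := by
      by_cases h : f k = f (k + 1) <;> simp [pvPref, h]
    rw [hcnt]
    refine Prod.ext rfl ?_
    simp only
    by_cases hk : k = 0
    · subst hk
      have h1 : pvPm f 2 = pvPref f 1 := by
        rw [pvPm_succ]
        have : pvPm f 1 = 1 := by
          rw [pvPm_succ]
          simp [pvPm, pvPref]
        rw [this]
        have := pvPref_pos f 1
        omega
      have := pvPref_pos f 1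
      simp only [if_neg (by omega : ¬ (0 + 1 = 0)), if_true, Nat.zero_add, h1]
      rw [max_eq_right (by exact_mod_cast by omega : (-1 : Int) ≤ (pvPref f 1 : Int))]
    · simp only [if_neg hk, if_neg (by omega : ¬ (k + 1 = 0))]
      rw [pvPm_succ f (k + 1)]
      push_cast
      rfl

lemma pvW_eq_pvPm (f : Nat → String) (n : Nat) (hn : 2 ≤ n) :
    pvW f (n - 1) = ((pvPm f n : Int)) := by
  obtain ⟨m, rfl⟩ : ∃ m, n = m + 2 := ⟨n - 2, by omega⟩
  unfold pvW
  rw [show m + 2 - 1 = m + 1 by omega, pvAScan_closed]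
  simp only [if_neg (by omega : ¬ (m + 1 = 0))]

-- longest run after swapping positions x and x+1 (distinct values), closed form
lemma pvPm_swap (f : Nat → String) (n x : Nat) (hx : x + 1 < n) (hne : f x ≠ f (x + 1)) :
    pvPm (fun j => if j = x then f (x + 1) else if j = x + 1 then f x else f j) n
      = max (max (max (pvPm f x) (pvSm f n (x + 2)))
          ((if 0 < x ∧ f (x - 1) = f (x + 1) then pvPref f (x - 1) else 0) + 1))
          (1 + (if x + 2 < n ∧ f (x + 2) = f x then pvSuf f n (x + 2) else 0)) := by
  set g : Nat → String := fun j => if j = x then f (x + 1) else if j = x + 1 then f x else f j with hg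
  set L0 : Nat := if 0 < x ∧ f (x - 1) = f (x + 1) then pvPref f (x - 1) else 0 with hL
  set R0 : Nat := if x + 2 < n ∧ f (x + 2) = f x then pvSuf f n (x + 2) else 0 with hR
  have hgx : g x = f (x + 1) := by simp [hg]
  have hgx1 : g (x + 1) = f x := by simp [hg]
  have hgne : ∀ j, j ≠ x → j ≠ x + 1 → g j = f j := fun j h1 h2 => by simp [hg, h1, h2]
  apply le_antisymm
  · apply pvPm_le
    intro i hi
    by_cases hix : i < x
    · rw [show pvPref g i = pvPref f i from
        pvPref_congr g f i (fun j hj => hgne j (by omega) (by omega))]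
      exact le_trans (le_pvPm f x i hix)
        (le_trans (le_max_left _ _) (le_trans (le_max_left _ _) (le_max_left _ _)))
    · push_neg at hix
      have hple := pvPref_le g i
      have hppos := pvPref_pos g i
      have hrun := pvPref_run g i
      set p := pvPref g i with hp
      have hallrun : ∀ j, i + 1 - p ≤ j → j ≤ i → g j = g i := by
        intro j h1 h2
        have := hrun (i - j) (by omega)
        rwa [show i - (i - j) = j by omega] at this
      rcases Nat.lt_trichotomy i (x + 1) with hi1 | hi1 | hi1
      · -- i = x : run ends at x with value f (x+1)
        have hieq : i = x := by omega
        subst hieq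
        have hpL : p ≤ L0 + 1 := by
          by_cases hsx : i + 1 - p < i
          · have hfx1 : f (i - 1) = f (i + 1) := by
              rw [← hgne (i - 1) (by omega) (by omega),
                hallrun (i - 1) (by omega) (by omega), hgx]
            rw [hL, if_pos ⟨by omega, hfx1⟩]
            have key := pvPref_max f (i - 1) (i + 1 - p) (by omega) ?_
            · omega
            · intro j h1 h2
              rw [← hgne j (by omega) (by omega), hallrun j (by omega) (by omega), hgx, hfx1]
          · omega
        exact le_trans hpL (le_trans (le_max_right _ _) (le_max_left _ _))
      · -- i = x + 1 : run cannot cross the (b,a) boundary, so p = 1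
        have hp1 : p ≤ 1 := by
          by_contra hp2
          have := hallrun x (by omega) (by omega)
          rw [hgx, hi1, hgx1] at this
          exact hne this.symm
        exact le_trans (by omega) (le_max_right _ (1 + R0))
      · -- i ≥ x + 2
        by_cases hs : x + 2 ≤ i + 1 - p
        · -- the run lies entirely in [x+2, i]
          have key := pvSuf_max f n (i + 1 - p) i (by omega) (by omega) ?_
          · have e : i - (i + 1 - p) + 1 = p := by omega
            rw [e] at key
            exact key.trans ((le_pvSm f n (x + 2) (i + 1 - p) hs (by omega)).trans
              (le_trans (le_max_right _ _) (le_trans (le_max_left _ _) (le_max_left _ _))))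
          · intro j h1 h2
            rw [← hgne j (by omega) (by omega), ← hgne (i + 1 - p) (by omega) (by omega),
              hallrun j (by omega) (by omega), hallrun (i + 1 - p) (by omega) (by omega)]
        · -- the run reaches x+1; it cannot contain x since g x ≠ g (x+1)
          have hs1 : i + 1 - p = x + 1 := by
            by_contra hss
            have hsx : i + 1 - p ≤ x := by omega
            have e1 := hallrun x (by omega) (by omega)
            have e2 := hallrun (x + 1) (by omega) (by omega)
            rw [hgx] at e1
            rw [hgx1] at e2
            exact hne (by rw [e2, ← e1])
          have hvi : g i = f x := by rw [← hallrun (x + 1) (by omega) (by omega), hgx1]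
          have hfx2 : f (x + 2) = f x := by
            rw [← hgne (x + 2) (by omega) (by omega),
              hallrun (x + 2) (by omega) (by omega), hvi]
          have hcR : x + 2 < n ∧ f (x + 2) = f x := ⟨by omega, hfx2⟩
          have hRv : R0 = pvSuf f n (x + 2) := by rw [hR, if_pos hcR]
          have key := pvSuf_max f n (x + 2) i (by omega) (by omega) ?_
          · have hpe : p = i - x := by omega
            have hfin : p ≤ 1 + R0 := by omega
            exact le_trans hfin (le_max_right _ _)
          · intro j h1 h2
            rw [← hgne j (by omega) (by omega), hallrun j (by omega) (by omega), hvi, hfx2]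
  · refine max_le (max_le (max_le ?_ ?_) ?_) ?_
    · exact pvPm_mono_congr f g x n (by omega) (fun j hj => hgne j (by omega) (by omega))
    · exact pvSm_le_pvPm f g n (x + 2) (fun j h1 h2 => hgne j (by omega) (by omega))
    · have hLx : L0 ≤ x := by
        rw [hL]; split
        · rename_i hc; exact le_trans (pvPref_le f (x - 1)) (by omega)
        · omega
      have key := pvPref_max g x (x - L0) (by omega) ?_
      · have e : x - (x - L0) + 1 = L0 + 1 := by omega
        rw [e] at key
        exact key.trans (le_pvPm g n _ (by omega))
      · intro j h1 h2
        rw [hgx]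
        rcases Nat.lt_or_ge j x with hlt | hge
        · have hL0 : 0 < L0 := by omega
          have hc : 0 < x ∧ f (x - 1) = f (x + 1) := by
            by_contra hcc
            rw [hL, if_neg hcc] at hL0
            omega
          have hLv : L0 = pvPref f (x - 1) := by rw [hL, if_pos hc]
          have hrn := pvPref_run f (x - 1) ((x - 1) - j) (by omega)
          rw [show (x - 1) - ((x - 1) - j) = j by omega] at hrn
          rw [hgne j (by omega) (by omega), hrn, hc.2]
        · have hje : j = x := by omega
          rw [hje, hgx]
    · have hRn : x + 2 + R0 ≤ n ∨ R0 = 0 := by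
        rw [hR]; split
        · rename_i hc; exact Or.inl (pvSuf_le f n (x + 2) hc.1)
        · exact Or.inr rfl
      have heLt : x + 1 + R0 < n := by rcases hRn with h | h <;> omega
      have hge : g (x + 1 + R0) = f x := by
        by_cases hR0 : R0 = 0
        · rw [hR0]
          simpa using hgx1
        · have hc : x + 2 < n ∧ f (x + 2) = f x := by
            by_contra hcc
            exact hR0 (by rw [hR, if_neg hcc])
          have hRv : R0 = pvSuf f n (x + 2) := by rw [hR, if_pos hc]
          have hrn := pvSuf_run f n (x + 2) hc.1 (R0 - 1) (by omega)
          rw [show x + 2 + (R0 - 1) = x + 1 + R0 by omega] at hrn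
          rw [hgne (x + 1 + R0) (by omega) (by omega), hrn, hc.2]
      have key := pvPref_max g (x + 1 + R0) (x + 1) (by omega) ?_
      · have e : (x + 1 + R0) - (x + 1) + 1 = 1 + R0 := by omega
        rw [e] at key
        exact key.trans (le_pvPm g n _ heLt)
      · intro j h1 h2
        rw [hge]
        rcases Nat.lt_or_ge j (x + 2) with hlt | hge2
        · have hje : j = x + 1 := by omega
          rw [hje, hgx1]
        · have hR0 : 0 < R0 := by omega
          have hc : x + 2 < n ∧ f (x + 2) = f x := by
            by_contra hcc
            rw [hR, if_neg hcc] at hR0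
            omega
          have hRv : R0 = pvSuf f n (x + 2) := by rw [hR, if_pos hc]
          have hrn := pvSuf_run f n (x + 2) hc.1 (j - (x + 2)) (by omega)
          rw [show x + 2 + (j - (x + 2)) = j by omega] at hrn
          rw [hgne j (by omega) (by omega), hrn, hc.2]

-- zip(line, line[1:]) as an index map
lemma pvZipTail (l : List String) :
    l.zip l.tail
      = (List.range (l.length - 1)).map (fun i => (l.getD i "", l.getD (i + 1) "")) := by
  induction l with
  | nil => simp
  | cons a t ih =>
    cases t with
    | nil => simp
    | cons b t' =>
      simp only [List.tail_cons, List.zip_cons_cons] at ih ⊢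
      rw [ih]
      simp only [List.length_cons, Nat.add_sub_cancel] at ih ⊢
      rw [List.range_succ_eq_map]
      simp [List.map_map, Function.comp_def]

-- the pref-building fold of B, closed form
lemma pvBuildRun (f : Nat → String) (k : Nat) :
    ((List.range k).map (fun i => (f i, f (i + 1)))).foldl
      (fun (p : List Int × Int) uw =>
        (p.1 ++ [if uw.1 == uw.2 then p.2 + 1 else 1],
         if uw.1 == uw.2 then p.2 + 1 else 1)) ([1], 1)
    = ((List.range (k + 1)).map (fun i => (pvPref f i : Int)), (pvPref f k : Int)) := by
  induction k with
  | zero => simp [pvPref]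
  | succ k ih =>
    rw [List.range_succ, List.map_append, List.foldl_append, ih]
    simp only [List.map_cons, List.map_nil, List.foldl_cons, List.foldl_nil]
    have hc : (if f k == f (k + 1) then (pvPref f k : Int) + 1 else 1)
        = (pvPref f (k + 1) : Int) := by
      by_cases h : f k = f (k + 1) <;> simp [pvPref, h]
    rw [hc, List.range_succ (n := k + 1), List.map_append]
    simp

-- the running-maximum fold of B, closed form
lemma pvBuildMax (g : Nat → Nat) (k : Nat) :
    ((List.range k).map (fun i => (g i : Int))).foldl
      (fun (p : List Int × Int) q => (p.1 ++ [max p.2 q], max p.2 q)) ([0], 0)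
    = ((List.range (k + 1)).map (fun j => (((Finset.range j).sup g : Nat) : Int)),
       (((Finset.range k).sup g : Nat) : Int)) := by
  induction k with
  | zero => simp
  | succ k ih =>
    rw [List.range_succ, List.map_append, List.foldl_append, ih]
    simp only [List.map_cons, List.map_nil, List.foldl_cons, List.foldl_nil]
    have hc : max (((Finset.range k).sup g : Nat) : Int) (g k : Int)
        = (((Finset.range (k + 1)).sup g : Nat) : Int) := by
      rw [Finset.range_add_one, Finset.sup_insert]
      push_cast
      rw [max_comm]
    rw [hc, List.range_succ (n := k + 1), List.map_append]
    simp

-- the tuple pvArrays computes, in closed form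
lemma pvArrays_eq (l : List String) (hm : 1 ≤ l.length) :
    pvArrays l = (l,
      (List.range l.length).map (fun i => (pvPref (fun j => l.getD j "") i : Int)),
      ((List.range l.length).map (fun i => (pvPref (fun j => l.reverse.getD j "") i : Int))).reverse,
      (List.range (l.length + 1)).map
        (fun k => ((((Finset.range k).sup (pvPref (fun j => l.getD j "")) : Nat)) : Int)),
      ((List.range (l.length + 1)).map
        (fun k => ((((Finset.range k).sup (pvPref (fun j => l.reverse.getD j "")) : Nat)) : Int))).reverse) := by
  unfold pvArrays
  dsimp only
  rw [pvZipTail l, pvZipTail l.reverse]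
  simp only [List.length_reverse]
  rw [pvBuildRun (fun j => l.getD j "") (l.length - 1),
      pvBuildRun (fun j => l.reverse.getD j "") (l.length - 1)]
  rw [show l.length - 1 + 1 = l.length by omega]
  rw [pvBuildMax (pvPref (fun j => l.getD j "")) l.length,
      pvBuildMax (pvPref (fun j => l.reverse.getD j "")) l.length]

lemma pvArrays_line (l : List String) : (pvArrays l).1 = l := rfl

lemma pvArrays_pref (l : List String) (hm : 1 ≤ l.length) (i : Nat) (hi : i < l.length) :
    ((pvArrays l).2.1).getD i 0 = (pvPref (fun j => l.getD j "") i : Int) := by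
  rw [pvArrays_eq l hm]
  exact PySem.List.getD_map_range _ l.length i 0 hi

lemma pvArrays_suf (l : List String) (hm : 1 ≤ l.length) (i : Nat) (hi : i < l.length) :
    ((pvArrays l).2.2.1).getD i 0 = (pvSuf (fun j => l.getD j "") l.length i : Int) := by
  rw [pvArrays_eq l hm]
  simp only
  rw [pvGetD_reverse _ i 0 (by simp [hi])]
  simp only [List.length_map, List.length_range]
  rw [PySem.List.getD_map_range _ l.length (l.length - 1 - i) 0 (by omega)]
  unfold pvSuf
  congr 1
  exact pvPref_congr _ _ (l.length - 1 - i) (fun j hj =>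
    pvGetD_reverse l j "" (by omega))

lemma pvArrays_premax (l : List String) (hm : 1 ≤ l.length) (k : Nat) (hk : k ≤ l.length) :
    ((pvArrays l).2.2.2.1).getD k 0 = (pvPm (fun j => l.getD j "") k : Int) := by
  rw [pvArrays_eq l hm]
  exact PySem.List.getD_map_range _ (l.length + 1) k 0 (by omega)

lemma pvSm_sup_rev (f frev : Nat → String) (m k : Nat) (hk : k ≤ m)
    (h : ∀ j < m, frev j = f (m - 1 - j)) :
    (((Finset.range (m - k)).sup (pvPref frev)) : Nat) = pvSm f m k := by
  apply le_antisymm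
  · apply Finset.sup_le
    intro i hi
    rw [Finset.mem_range] at hi
    have e : pvPref frev i = pvSuf f m (m - 1 - i) := by
      unfold pvSuf
      rw [show m - 1 - (m - 1 - i) = i by omega]
      exact pvPref_congr frev _ i (fun j hj => h j (by omega))
    rw [e]
    exact le_pvSm f m k (m - 1 - i) (by omega) (by omega)
  · apply pvSm_le
    intro i hki him
    have e : pvSuf f m i = pvPref frev (m - 1 - i) := by
      unfold pvSuf
      exact pvPref_congr _ frev (m - 1 - i) (fun j hj => (h j (by omega)).symm)
    rw [e]
    exact Finset.le_sup (Finset.mem_range.mpr (by omega))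

lemma pvArrays_sufmax (l : List String) (hm : 1 ≤ l.length) (k : Nat) (hk : k ≤ l.length) :
    ((pvArrays l).2.2.2.2).getD k 0 = (pvSm (fun j => l.getD j "") l.length k : Int) := by
  rw [pvArrays_eq l hm]
  simp only
  rw [pvGetD_reverse _ k 0 (by simp; omega)]
  simp only [List.length_map, List.length_range]
  rw [PySem.List.getD_map_range _ (l.length + 1) (l.length + 1 - 1 - k) 0 (by omega)]
  rw [show l.length + 1 - 1 - k = l.length - k by omega]
  exact_mod_cast congrArg (Nat.cast (R := Int))
    (pvSm_sup_rev (fun j => l.getD j "") (fun j => l.reverse.getD j "") l.length k hk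
      (fun j hj => pvGetD_reverse l j "" hj))

-- pvReplace evaluates to the longest run of the line with position x replaced by v
lemma pvReplace_eval (l : List String) (n x : Nat) (v : String) (hn : 2 ≤ n)
    (hlen : l.length = n) (hx : x < n) :
    pvReplace (n : Int) (pvArrays l) (x : Int) v
      = ((pvPm (fun j => if j = x then v else l.getD j "") n : Nat) : Int) := by
  have hm : 1 ≤ l.length := by omega
  unfold pvReplace
  dsimp only
  rw [pvArrays_line]
  have eleft : (if 0 < (x : Int) ∧ PySem.List.pyGetD l ((x : Int) - 1) "" = v
        then PySem.List.pyGetD (pvArrays l).2.1 ((x : Int) - 1) 0 else 0)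
      = (((if 0 < x ∧ l.getD (x - 1) "" = v
          then pvPref (fun j => l.getD j "") (x - 1) else 0 : Nat)) : Int) := by
    by_cases hx0 : 0 < x
    · rw [show (x : Int) - 1 = ((x - 1 : Nat) : Int) by omega]
      simp only [PySem.List.pyGetD_natCast]
      rw [pvArrays_pref l hm (x - 1) (by omega)]
      by_cases hv : l.getD (x - 1) "" = v
      · simp [hx0, hv]
      · simp [hx0, hv]
    · have hx0' : x = 0 := by omega
      subst hx0'
      simp
  have eright : (if (x : Int) + 1 < (n : Int) ∧ PySem.List.pyGetD l ((x : Int) + 1) "" = v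
        then PySem.List.pyGetD (pvArrays l).2.2.1 ((x : Int) + 1) 0 else 0)
      = (((if x + 1 < n ∧ l.getD (x + 1) "" = v
          then pvSuf (fun j => l.getD j "") n (x + 1) else 0 : Nat)) : Int) := by
    rw [show (x : Int) + 1 = ((x + 1 : Nat) : Int) by push_cast; ring]
    simp only [PySem.List.pyGetD_natCast]
    by_cases hc : x + 1 < n
    · rw [pvArrays_suf l hm (x + 1) (by omega), hlen]
      have hci : ((x : Int) + 1) < (n : Int) := by exact_mod_cast hc
      by_cases hv : l.getD (x + 1) "" = v
      · simp [hv, hci, hc]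
      · rw [if_neg (fun h => hv h.2), if_neg (fun h : x + 1 < n ∧ _ => hv h.2)]
        simp
    · rw [if_neg (fun h => hc (by exact_mod_cast h.1)),
          if_neg (fun h : x + 1 < n ∧ _ => hc h.1)]
      simp
  rw [eleft, eright]
  rw [show ((x : Int) + 1) = ((x + 1 : Nat) : Int) by push_cast; ring]
  simp only [PySem.List.pyGetD_natCast]
  rw [pvArrays_premax l hm x (by omega), pvArrays_sufmax l hm (x + 1) (by omega), hlen]
  rw [pvPm_replace (fun j => l.getD j "") v n x hx]
  push_cast [apply_ite (fun (t : Nat) => (t : Int))]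
  rfl

-- pvPairswap evaluates to the longest run of the line with x and x+1 swapped
lemma pvPairswap_eval (l : List String) (n x : Nat) (hn : 2 ≤ n)
    (hlen : l.length = n) (hx : x + 1 < n) :
    pvPairswap (n : Int) (pvArrays l) (x : Int)
      = ((pvPm (fun j => if j = x then l.getD (x + 1) ""
          else if j = x + 1 then l.getD x "" else l.getD j "") n : Nat) : Int) := by
  have hm : 1 ≤ l.length := by omega
  unfold pvPairswap
  dsimp only
  rw [pvArrays_line]
  rw [show ((x : Int) + 1) = ((x + 1 : Nat) : Int) by push_cast; ring]
  simp only [PySem.List.pyGetD_natCast]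
  by_cases hab : l.getD x "" = l.getD (x + 1) ""
  · rw [if_pos hab]
    rw [pvArrays_premax l hm n (by omega)]
    congr 1
    apply pvPm_congr
    intro j hj
    by_cases h1 : j = x
    · simp only [h1, if_pos rfl]
      exact hab
    · by_cases h2 : j = x + 1
      · simp only [h1, h2, if_neg (by omega : ¬ (x + 1 = x)), if_pos rfl]
        exact hab.symm
      · simp [h1, h2]
  · rw [if_neg hab]
    have eleft : (if 0 < (x : Int) ∧ PySem.List.pyGetD l ((x : Int) - 1) "" = l.getD (x + 1) ""
          then PySem.List.pyGetD (pvArrays l).2.1 ((x : Int) - 1) 0 else 0)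
        = (((if 0 < x ∧ l.getD (x - 1) "" = l.getD (x + 1) ""
            then pvPref (fun j => l.getD j "") (x - 1) else 0 : Nat)) : Int) := by
      by_cases hx0 : 0 < x
      · rw [show (x : Int) - 1 = ((x - 1 : Nat) : Int) by omega]
        simp only [PySem.List.pyGetD_natCast]
        rw [pvArrays_pref l hm (x - 1) (by omega)]
        by_cases hv : l.getD (x - 1) "" = l.getD (x + 1) ""
        · simp [hx0, hv]
        · simp [hx0, hv]
      · have hx0' : x = 0 := by omega
        subst hx0'
        simp
    have eright : (if (x : Int) + 2 < (n : Int) ∧ PySem.List.pyGetD l ((x : Int) + 2) "" = l.getD x ""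
          then PySem.List.pyGetD (pvArrays l).2.2.1 ((x : Int) + 2) 0 else 0)
        = (((if x + 2 < n ∧ l.getD (x + 2) "" = l.getD x ""
            then pvSuf (fun j => l.getD j "") n (x + 2) else 0 : Nat)) : Int) := by
      rw [show (x : Int) + 2 = ((x + 2 : Nat) : Int) by push_cast; ring]
      simp only [PySem.List.pyGetD_natCast]
      by_cases hc : x + 2 < n
      · rw [pvArrays_suf l hm (x + 2) (by omega), hlen]
        have hci : ((x : Int) + 2) < (n : Int) := by exact_mod_cast hc
        by_cases hv : l.getD (x + 2) "" = l.getD x ""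
        · simp [hv, hci, hc]
        · rw [if_neg (fun h => hv h.2), if_neg (fun h : x + 2 < n ∧ _ => hv h.2)]
          simp
      · rw [if_neg (fun h => hc (by exact_mod_cast h.1)),
            if_neg (fun h : x + 2 < n ∧ _ => hc h.1)]
        simp
    rw [eleft, eright]
    rw [show ((x : Int) + 2) = ((x + 2 : Nat) : Int) by push_cast; ring]
    simp only [PySem.List.pyGetD_natCast]
    rw [pvArrays_premax l hm x (by omega), pvArrays_sufmax l hm (x + 2) (by omega), hlen]
    rw [pvPm_swap (fun j => l.getD j "") n x hx hab]
    push_cast [apply_ite (fun (t : Nat) => (t : Int))]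
    rfl

-- B's solve_alt as a max-fold over its two contribution lists
lemma pvSolveAlt_eq (board : List (List String)) (n : Nat) (hn : board.length = n)
    (hrow : ∀ r ∈ board, board.length ≤ r.length) (h2 : 2 ≤ n) :
    solve_alt board = (pvLH board n ++ pvLV board n).foldl max (-1) := by
  unfold solve_alt pvLH pvLV
  simp only [PySem.List.len_eq, hn]
  rw [if_neg (show ¬ ((n : Int) < 2) by omega)]
  have hcast : (n : Int) - 1 = ((n - 1 : Nat) : Int) := by omega
  rw [hcast, List.foldl_append]
  simp only [PySem.List.pyRange_zero_natCast, List.map_map, Function.comp_def,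
    PySem.List.pyGetD_natCast, PySem.List.slice_to_natCast, List.foldl_map]
  have hrowlen : ∀ y : Nat, y < n → ((board.getD y []).take n).length = n := by
    intro y hy
    have := hn ▸ pvRowLen board hrow y (by omega)
    rw [List.length_take]
    omega
  have hcollen : ∀ x : Nat, (pvColL board x).length = n := by
    intro x
    simp [pvColL, hn]
  have hrowAr : ∀ y : Nat, y < n →
      (List.map (fun r => pvArrays (List.take n r)) board).getD y ([], [], [], [], [])
        = pvArrays ((board.getD y []).take n) := by
    intro y hy
    exact pvGetD_mapf board _ y _ [] (by omega)
  have hcolAr : ∀ x : Nat, x < n →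
      ((List.range n).map (fun x => pvArrays (List.map (fun r => r.getD x "") board))).getD
          x ([], [], [], [], [])
        = pvArrays (pvColL board x) := by
    intro x hx
    rw [PySem.List.getD_map_range _ n x _ hx]
    rfl
  refine Eq.trans (PySem.List.foldl_congr_mem _ _
    (fun acc y => ((List.range n).flatMap (fun x => pvVVal board n y x)).foldl max acc) _ ?_)
    (Eq.trans (pvFoldlMax_flat _ _ _) ?_)
  · -- the vertical double loop
    intro acc y hy
    have hyn : y + 1 < n := by have := List.mem_range.mp hy; omega
    refine Eq.trans (PySem.List.foldl_congr_mem _ _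
      (fun acc x => (pvVVal board n y x).foldl max acc) _ ?_) (pvFoldlMax_flat _ _ _)
    intro a x hx
    have hxn : x < n := List.mem_range.mp hx
    have cy1 : ((y : Int) + 1) = ((y + 1 : Nat) : Int) := by push_cast; ring
    rw [cy1]
    simp only [PySem.List.pyGetD_natCast]
    rw [hrowAr y (by omega), hrowAr (y + 1) (by omega), hcolAr x hxn]
    have e1 : pvReplace (n : Int) (pvArrays ((board.getD y []).take n)) (x : Int)
        ((board.getD (y + 1) []).getD x "") = pvW (pvVRow1 board y x) (n - 1) := by
      rw [pvReplace_eval _ n x _ h2 (hrowlen y (by omega)) hxn, pvW_eq_pvPm _ n h2]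
      congr 1
      apply pvPm_congr
      intro j hj
      by_cases hjx : j = x
      · simp [pvVRow1, hjx, pvG]
      · simp only [pvVRow1, if_neg hjx]
        unfold pvG
        exact pvGetD_take _ n j "" hj
    have e2 : pvReplace (n : Int) (pvArrays ((board.getD (y + 1) []).take n)) (x : Int)
        ((board.getD y []).getD x "") = pvW (pvVRow2 board y x) (n - 1) := by
      rw [pvReplace_eval _ n x _ h2 (hrowlen (y + 1) (by omega)) hxn, pvW_eq_pvPm _ n h2]
      congr 1
      apply pvPm_congr
      intro j hj
      by_cases hjx : j = x
      · simp [pvVRow2, hjx, pvG]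
      · simp only [pvVRow2, if_neg hjx]
        unfold pvG
        exact pvGetD_take _ n j "" hj
    have e3 : pvPairswap (n : Int) (pvArrays (pvColL board x)) (y : Int)
        = pvW (pvVCol board y x) (n - 1) := by
      rw [pvPairswap_eval _ n y h2 (hcollen x) (by omega), pvW_eq_pvPm _ n h2]
      congr 1
      apply pvPm_congr
      intro j hj
      unfold pvVCol
      split_ifs with h1' h2'
      · exact pvColL_getD board x (y + 1) (by omega)
      · exact pvColL_getD board x y (by omega)
      · exact pvColL_getD board x j (by omega)
    rw [e1, e2, e3]
    simp only [pvVVal, List.foldl_cons, List.foldl_nil]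
  · -- the init: the horizontal double loop
    congr 1
    refine Eq.trans (PySem.List.foldl_congr_mem _ _
      (fun acc y => ((List.range (n - 1)).flatMap (fun x => pvHVal board n y x)).foldl max acc) _ ?_)
      (pvFoldlMax_flat _ _ _)
    intro acc y hy
    have hyn : y < n := List.mem_range.mp hy
    refine Eq.trans (PySem.List.foldl_congr_mem _ _
      (fun acc x => (pvHVal board n y x).foldl max acc) _ ?_) (pvFoldlMax_flat _ _ _)
    intro a x hx
    have hxn : x + 1 < n := by have := List.mem_range.mp hx; omega
    have cx1 : ((x : Int) + 1) = ((x + 1 : Nat) : Int) := by push_cast; ring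
    rw [cx1]
    simp only [PySem.List.pyGetD_natCast]
    rw [hrowAr y (by omega), hcolAr x (by omega), hcolAr (x + 1) (by omega)]
    have e1 : pvPairswap (n : Int) (pvArrays ((board.getD y []).take n)) (x : Int)
        = pvW (pvHRow board y x) (n - 1) := by
      rw [pvPairswap_eval _ n x h2 (hrowlen y (by omega)) hxn, pvW_eq_pvPm _ n h2]
      congr 1
      apply pvPm_congr
      intro j hj
      unfold pvHRow
      split_ifs with h1' h2'
      · unfold pvG
        exact pvGetD_take _ n (x + 1) "" (by omega)
      · unfold pvG
        exact pvGetD_take _ n x "" (by omega)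
      · unfold pvG
        exact pvGetD_take _ n j "" hj
    have e2 : pvReplace (n : Int) (pvArrays (pvColL board x)) (y : Int)
        ((board.getD y []).getD (x + 1) "") = pvW (pvHCol1 board y x) (n - 1) := by
      rw [pvReplace_eval _ n y _ h2 (hcollen x) (by omega), pvW_eq_pvPm _ n h2]
      congr 1
      apply pvPm_congr
      intro j hj
      unfold pvHCol1
      split_ifs with h1'
      · rfl
      · exact pvColL_getD board x j (by omega)
    have e3 : pvReplace (n : Int) (pvArrays (pvColL board (x + 1))) (y : Int)
        ((board.getD y []).getD x "") = pvW (pvHCol2 board y x) (n - 1) := by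
      rw [pvReplace_eval _ n y _ h2 (hcollen (x + 1)) (by omega), pvW_eq_pvPm _ n h2]
      congr 1
      apply pvPm_congr
      intro j hj
      unfold pvHCol2
      split_ifs with h1'
      · rfl
      · exact pvColL_getD board (x + 1) j (by omega)
    rw [e1, e2, e3]
    simp only [pvHVal, List.foldl_cons, List.foldl_nil]

-- boards with at most one row: no swap exists, both return -1
lemma pvSolve_small (board : List (List String)) (h : board.length ≤ 1) :
    solve board = -1 := by
  have e0 : PySem.List.pyRange 0 0 1 = [] := by decide
  have e1 : PySem.List.pyRange 0 1 1 = [0] := by decide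
  cases board with
  | nil => simp [solve, e0]
  | cons r t =>
    cases t with
    | nil => simp [solve, e1]
    | cons r2 t2 => simp at h

lemma pvSolveAlt_small (board : List (List String)) (h : board.length ≤ 1) :
    solve_alt board = -1 := by
  unfold solve_alt
  simp only [PySem.List.len_eq]
  rw [if_pos (show ((board.length : Int) < 2) by omega)]

-- ===== VERDICT (by name: the statement is the Claim_ definition above) =====
theorem solve_spec : Claim_equal_solve := by
  intro board _ hpre
  unfold Spec_solve
  by_cases h1 : board.length ≤ 1
  · rw [pvSolve_small board h1, pvSolveAlt_small board h1]
  · have h2 : 2 ≤ board.length := by omega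
    have hrow : ∀ r ∈ board, board.length ≤ r.length := hpre.resolve_left (by omega)
    rw [pvSolve_eq board board.length rfl hrow h2,
        pvSolveAlt_eq board board.length rfl hrow h2]
    exact List.Perm.foldl_op_eq (pvPerm_LA board board.length h2)
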